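-- pv_equiv track=rewrite | github.com/w31r4/compile_lab | lab2-legacy/main.py | merge_transitions
-- ===== SOURCE A (Python) =====
-- def merge_transitions(t1, t2):
--     """合并两份 {state: {symbol: set(next_states)}} 转移表"""
--     transitions = {}
--     for src, mapping in t1.items():
--         transitions[src] = {sym: set(dsts) for sym, dsts in mapping.items()}
--     for src, mapping in t2.items():
--         if src not in transitions:
--             transitions[src] = {}
--         for sym, dsts in mapping.items():
--             transitions[src].setdefault(sym, set()).update(dsts)
--     return transitions
-- ===== SOURCE B (Python) =====
-- def merge_transitions(t1, t2):
--     """合并两份 {state: {symbol: set(next_states)}} 转移表"""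
--     items = list(t1.items()) + list(t2.items())
--     flat = {}  # composite key (src, sym) -> set of destination states
--     for src, mapping in items:
--         for sym, dsts in mapping.items():
--             flat.setdefault((src, sym), set()).update(dsts)
--     nested = {src: {} for src, _ in items}
--     for (src, sym), dsts in flat.items():
--         nested[src][sym] = dsts
--     return nested
-- ===== Notes on version B (the rewrite author's own statement) =====
-- stated objective: alternative
-- what changed: A merges nested dict-of-dicts in place (copy t1, then overlay t2 with setdefault/update); B flattens both tables into one flat dict keyed by composite (src, sym) pairs in a single accumulation pass and then regroups that flat dict back into the nested shape by source state.
import Mathlib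
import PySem

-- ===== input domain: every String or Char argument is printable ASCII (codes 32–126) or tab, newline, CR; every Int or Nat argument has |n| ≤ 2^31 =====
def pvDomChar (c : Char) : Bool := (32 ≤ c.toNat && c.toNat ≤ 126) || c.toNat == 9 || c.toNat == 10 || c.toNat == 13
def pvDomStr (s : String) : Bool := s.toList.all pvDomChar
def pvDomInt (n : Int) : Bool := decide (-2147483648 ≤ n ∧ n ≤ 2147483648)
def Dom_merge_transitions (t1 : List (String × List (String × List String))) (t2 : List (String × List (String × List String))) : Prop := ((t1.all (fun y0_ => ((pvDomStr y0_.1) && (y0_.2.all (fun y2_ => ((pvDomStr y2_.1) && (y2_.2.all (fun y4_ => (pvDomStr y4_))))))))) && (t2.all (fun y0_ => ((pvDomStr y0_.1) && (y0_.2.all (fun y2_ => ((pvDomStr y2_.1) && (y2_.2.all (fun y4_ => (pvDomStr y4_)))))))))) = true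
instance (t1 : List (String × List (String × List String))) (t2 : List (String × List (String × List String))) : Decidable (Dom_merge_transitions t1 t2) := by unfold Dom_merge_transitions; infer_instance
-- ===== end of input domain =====

-- B merges by flattening both tables into one flat dict keyed by composite (src, sym) pairs in a
-- single accumulation pass and then regrouping by source state, instead of A's in-place merge of
-- nested dicts (copy t1, overlay t2); different data structure, similar size (objective: alternative).


-- ===== PORT A =====
-- transliteration of A: copy t1 (rebuilding each inner dict with fresh sets), then overlay t2
-- via setdefault(sym, set()).update(dsts); the dict-of-dicts is returned as its items lists.
def merge_transitions (t1 : List (String × List (String × List String))) (t2 : List (String × List (String × List String))) : List (String × List (String × List String)) :=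
  let t0 : PySem.Dict String (PySem.Dict String (PySem.Set String)) :=
    t1.foldl (fun d p => d.insert p.1
      (p.2.foldl (fun m q => m.insert q.1 (PySem.Set.ofList q.2)) PySem.Dict.empty)) PySem.Dict.empty
  let tf : PySem.Dict String (PySem.Dict String (PySem.Set String)) :=
    t2.foldl (fun d p =>
      let d1 := if d.contains p.1 then d else d.insert p.1 PySem.Dict.empty
      p.2.foldl (fun d2 q =>
        d2.modify p.1 PySem.Dict.empty
          (fun m => m.insert q.1 (PySem.Set.update (m.getD q.1 PySem.Set.empty) q.2))) d1) t0
  tf.items.map (fun p => (p.1, p.2.items))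

-- ===== PORT B =====
-- transliteration of B: one accumulation pass over the items of both tables into a flat dict
-- keyed by (src, sym) pairs (setdefault((src,sym), set()).update(dsts) = modify with Set.update);
-- then the nested result: seed {src: {} for src, _ in items}, and one pass over the flat items
-- assigning nested[src][sym] = dsts (Python indexes nested[src], which is always present because
-- every flat key's source occurs in items; the modify default Dict.empty only totalizes that).
def merge_transitions_alt (t1 : List (String × List (String × List String))) (t2 : List (String × List (String × List String))) : List (String × List (String × List String)) :=
  let items := t1 ++ t2
  let flat : PySem.Dict (String × String) (PySem.Set String) :=
    items.foldl (fun f p =>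
      p.2.foldl (fun f2 q => f2.modify (p.1, q.1) PySem.Set.empty (fun s => PySem.Set.update s q.2)) f)
      PySem.Dict.empty
  let nested0 : PySem.Dict String (PySem.Dict String (PySem.Set String)) :=
    items.foldl (fun n p => n.insert p.1 PySem.Dict.empty) PySem.Dict.empty
  let nested : PySem.Dict String (PySem.Dict String (PySem.Set String)) :=
    flat.items.foldl (fun n kv => n.modify kv.1.1 PySem.Dict.empty (fun m => m.insert kv.1.2 kv.2)) nested0
  nested.items.map (fun p => (p.1, p.2.items))

-- ===== PRECONDITION & SPEC =====
-- Pre_ restricts the association lists to well-formed encodings of Python dicts: the outer key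
-- lists and t1's inner key lists are duplicate-free (a Python dict cannot carry duplicate keys,
-- so every input drawn from real dicts satisfies this; on duplicate keys the first-match/
-- last-write reading of an association list is ambiguous). t2's inner lists need no restriction.
def Pre_merge_transitions (t1 : List (String × List (String × List String))) (t2 : List (String × List (String × List String))) : Prop :=
  (t1.map Prod.fst).Nodup ∧ (t2.map Prod.fst).Nodup ∧
  (∀ p ∈ t1, (p.2.map Prod.fst).Nodup)
instance (t1 : List (String × List (String × List String))) (t2 : List (String × List (String × List String))) : Decidable (Pre_merge_transitions t1 t2) := by unfold Pre_merge_transitions; infer_instance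
def pvWitness_merge_transitions : (List (String × List (String × List String))) × (List (String × List (String × List String))) :=
  ([("q0", [("a", ["q1"])])], [("q0", [("a", ["q2"]), ("b", ["q0"])]), ("q1", [("a", ["q1"])])])

def Spec_merge_transitions (t1 : List (String × List (String × List String))) (t2 : List (String × List (String × List String))) (out : List (String × List (String × List String))) : Prop := out = merge_transitions_alt t1 t2
instance (t1 : List (String × List (String × List String))) (t2 : List (String × List (String × List String))) (out : List (String × List (String × List String))) : Decidable (Spec_merge_transitions t1 t2 out) := by unfold Spec_merge_transitions; infer_instance

-- ===== CLAIM (what is proved, stated in full; the proofs are below) =====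
def Claim_equal_merge_transitions : Prop := ∀ (t1 : List (String × List (String × List String))) (t2 : List (String × List (String × List String))), Dom_merge_transitions t1 t2 → Pre_merge_transitions t1 t2 → Spec_merge_transitions t1 t2 (merge_transitions t1 t2)

-- ===== LEMMAS AND PROOFS =====

-- the two inner-dict loop shapes of A, named for the proofs
def pvInner1 (m1 : List (String × List String)) : PySem.Dict String (PySem.Set String) :=
  m1.foldl (fun m q => m.insert q.1 (PySem.Set.ofList q.2)) PySem.Dict.empty

def pvInnerApply (m2 : List (String × List String)) (m : PySem.Dict String (PySem.Set String)) : PySem.Dict String (PySem.Set String) :=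
  m2.foldl (fun m q => m.insert q.1 (PySem.Set.update (m.getD q.1 PySem.Set.empty) q.2)) m

-- B's projection: the flat dict restricted to one source, re-read as an inner dict
def pvProjL (l : List ((String × String) × PySem.Set String)) (src : String) : List (String × PySem.Set String) :=
  (l.filter (fun kv => kv.1.1 == src)).map (fun kv => (kv.1.2, kv.2))

def pvProj (f : PySem.Dict (String × String) (PySem.Set String)) (src : String) : PySem.Dict String (PySem.Set String) :=
  PySem.Dict.mk (pvProjL f.items src)

-- generic: a fold whose steps do not touch key k leaves getD at k unchanged
lemma pv_foldl_getD_not_mem {ν β : Type} (F : PySem.Dict String ν → String × β → PySem.Dict String ν) (dflt : ν)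
    (Hne : ∀ d p k, k ≠ p.1 → (F d p).getD k dflt = d.getD k dflt) :
    ∀ (l : List (String × β)) (d : PySem.Dict String ν) (k : String), k ∉ l.map Prod.fst →
      (l.foldl F d).getD k dflt = d.getD k dflt := by
  intro l
  induction l with
  | nil => intro d k _; rfl
  | cons p l ih =>
    intro d k hk
    simp only [List.map_cons, List.mem_cons, not_or] at hk
    rw [List.foldl_cons, ih _ k hk.2, Hne d p k hk.1]

-- generic: with duplicate-free keys, the fold's getD at k is determined by the (unique) entry at k
lemma pv_foldl_getD {ν β : Type} (F : PySem.Dict String ν → String × β → PySem.Dict String ν)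
    (G : ν → String × β → ν) (dflt : ν)
    (Hne : ∀ d p k, k ≠ p.1 → (F d p).getD k dflt = d.getD k dflt)
    (Hself : ∀ d p, (F d p).getD p.1 dflt = G (d.getD p.1 dflt) p) :
    ∀ (l : List (String × β)), (l.map Prod.fst).Nodup → ∀ (d : PySem.Dict String ν) (k : String),
      (l.foldl F d).getD k dflt =
        (match l.find? (fun q => q.1 == k) with
         | some q => G (d.getD k dflt) q
         | none => d.getD k dflt) := by
  intro l
  induction l with
  | nil => intro _ d k; rfl
  | cons p l ih =>
    intro hnd d k
    simp only [List.map_cons, List.nodup_cons] at hnd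
    by_cases h : p.1 = k
    · subst h
      rw [List.foldl_cons, pv_foldl_getD_not_mem F dflt Hne l (F d p) p.1 hnd.1, Hself d p]
      simp [List.find?]
    · have hne : (p.1 == k) = false := by simp [h]
      rw [List.foldl_cons, ih hnd.2 (F d p) k, Hne d p k (fun hk => h hk.symm)]
      simp [List.find?, hne]

-- generic: keys of a fold whose steps each add one key
lemma pv_foldl_keys {ν β : Type} (F : PySem.Dict String ν → String × β → PySem.Dict String ν)
    (Hkeys : ∀ d p, (F d p).keys = PySem.Set.add d.keys p.1) :
    ∀ (l : List (String × β)) (d : PySem.Dict String ν),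
      (l.foldl F d).keys = PySem.Set.update d.keys (l.map Prod.fst) := by
  intro l
  induction l with
  | nil => intro d; exact (PySem.Set.update_nil _).symm
  | cons p l ih => intro d; rw [List.foldl_cons, ih, Hkeys, List.map_cons, PySem.Set.update_cons]

lemma pv_keys_insert_add {ν : Type} (d : PySem.Dict String ν) (k : String) (v : ν) :
    (d.insert k v).keys = PySem.Set.add d.keys k := by
  by_cases h : d.contains k = true
  · rw [PySem.Dict.keys_insert_of_contains d v h,
      PySem.Set.add_of_mem ((PySem.Dict.contains_iff_mem_keys d k).1 h)]
  · rw [PySem.Dict.keys_insert_of_not_contains d v (by simpa using h),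
      PySem.Set.add_of_not_mem (fun hm => h ((PySem.Dict.contains_iff_mem_keys d k).2 hm))]

-- the phase-2 inner loop of A, at keys other than src / at src / its keys
lemma pv_modfold_getD_ne (src k : String) (hk : k ≠ src) :
    ∀ (mapping : List (String × List String)) (d : PySem.Dict String (PySem.Dict String (PySem.Set String))),
      (mapping.foldl (fun d2 q => d2.modify src PySem.Dict.empty
          (fun m => m.insert q.1 (PySem.Set.update (m.getD q.1 PySem.Set.empty) q.2))) d).getD k PySem.Dict.empty
        = d.getD k PySem.Dict.empty := by
  intro mapping
  induction mapping with
  | nil => intro d; rfl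
  | cons q mapping ih =>
    intro d
    rw [List.foldl_cons, ih, PySem.Dict.getD_modify_of_ne _ _ _ hk]

lemma pv_modfold_getD_self (src : String) :
    ∀ (mapping : List (String × List String)) (d : PySem.Dict String (PySem.Dict String (PySem.Set String))),
      (mapping.foldl (fun d2 q => d2.modify src PySem.Dict.empty
          (fun m => m.insert q.1 (PySem.Set.update (m.getD q.1 PySem.Set.empty) q.2))) d).getD src PySem.Dict.empty
        = pvInnerApply mapping (d.getD src PySem.Dict.empty) := by
  intro mapping
  induction mapping with
  | nil => intro d; rfl
  | cons q mapping ih =>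
    intro d
    rw [List.foldl_cons, ih, PySem.Dict.getD_modify_self]
    rfl

lemma pv_modfold_keys (src : String) :
    ∀ (mapping : List (String × List String)) (d : PySem.Dict String (PySem.Dict String (PySem.Set String))),
      src ∈ d.keys →
      (mapping.foldl (fun d2 q => d2.modify src PySem.Dict.empty
          (fun m => m.insert q.1 (PySem.Set.update (m.getD q.1 PySem.Set.empty) q.2))) d).keys = d.keys := by
  intro mapping
  induction mapping with
  | nil => intro d _; rfl
  | cons q mapping ih =>
    intro d hd
    rw [List.foldl_cons,
      ih _ (by rw [PySem.Dict.keys_modify,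
        PySem.Dict.keys_insert_of_contains _ _ ((PySem.Dict.contains_iff_mem_keys d src).2 hd)]; exact hd),
      PySem.Dict.keys_modify,
      PySem.Dict.keys_insert_of_contains _ _ ((PySem.Dict.contains_iff_mem_keys d src).2 hd)]

-- ===== B-side: projection lemmas =====

lemma pv_find_projL (src y : String) :
    ∀ (l : List ((String × String) × PySem.Set String)),
      (pvProjL l src).find? (fun q => q.1 == y)
        = (l.find? (fun kv => kv.1 == (src, y))).map (fun kv => (kv.1.2, kv.2)) := by
  intro l
  induction l with
  | nil => rfl
  | cons kv l ih =>
    obtain ⟨⟨a, b⟩, v⟩ := kv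
    by_cases ha : a = src
    · subst ha
      by_cases hb : b = y
      · subst hb; simp [pvProjL, List.find?]
      · have h2 : (((a, b) : String × String) == (a, y)) = false := by
          simp [beq_eq_false_iff_ne, hb]
        simp only [pvProjL, List.filter_cons, List.find?] at *
        simp [hb, h2, ih]
    · have h2 : (((a, b) : String × String) == (src, y)) = false := by
        simp [beq_eq_false_iff_ne, ha]
      simp only [pvProjL, List.filter_cons, List.find?] at *
      simp [ha, h2, ih]


lemma pvProjL_cons (a b : String) (w : PySem.Set String) (l : List ((String × String) × PySem.Set String)) (src : String) :
    pvProjL (((a, b), w) :: l) src = (if a = src then [(b, w)] else []) ++ pvProjL l src := by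
  by_cases h : a = src <;> simp [pvProjL, h]

lemma pv_projL_replace (s y src : String) (v : PySem.Set String) :
    ∀ (l : List ((String × String) × PySem.Set String)),
      pvProjL (l.map (fun p => if (p.1 == (s, y)) = true then ((s, y), v) else p)) src
        = if s = src then (pvProjL l src).map (fun q => if (q.1 == y) = true then (y, v) else q)
          else pvProjL l src := by
  intro l
  induction l with
  | nil => by_cases h : s = src <;> simp [pvProjL, h]
  | cons kv l ih =>
    obtain ⟨⟨a, b⟩, v'⟩ := kv
    rw [List.map_cons]
    by_cases hab : ((a, b) : String × String) = (s, y)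
    · obtain ⟨ha, hb⟩ := Prod.mk.injEq .. ▸ hab
      subst ha; subst hb
      rw [if_pos (by simp), pvProjL_cons, pvProjL_cons, ih]
      by_cases hs : a = src
      · rw [if_pos hs, if_pos hs, if_pos hs, List.map_append]
        simp [hs]
      · rw [if_neg hs, if_neg hs, if_neg hs]
        simp [hs]
    · rw [if_neg (by simp [hab]), pvProjL_cons, pvProjL_cons, ih]
      by_cases hs : s = src
      · rw [if_pos hs, if_pos hs, List.map_append]
        by_cases ha : a = src
        · rw [if_pos ha]
          have hb : (b == y) = false := by
            simp only [beq_eq_false_iff_ne]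
            intro hby
            exact hab (by rw [hby, ha, hs])
          simp only [List.map_cons, List.map_nil]
          rw [if_neg (by simp [hb])]
        · rw [if_neg ha]
          simp
      · rw [if_neg hs, if_neg hs]

lemma pv_getD_proj (f : PySem.Dict (String × String) (PySem.Set String)) (src y : String) (dflt : PySem.Set String) :
    (pvProj f src).getD y dflt = f.getD (src, y) dflt := by
  simp only [PySem.Dict.getD, PySem.Dict.get?, pvProj, pv_find_projL]
  cases f.items.find? (fun kv => kv.1 == (src, y)) <;> rfl

lemma pv_contains_proj (f : PySem.Dict (String × String) (PySem.Set String)) (src y : String) :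
    (pvProj f src).contains y = f.contains (src, y) := by
  rw [PySem.Dict.contains_eq_isSome_get?, PySem.Dict.contains_eq_isSome_get?]
  simp only [PySem.Dict.get?, pvProj, pv_find_projL]
  cases f.items.find? (fun kv => kv.1 == (src, y)) <;> rfl

lemma pv_projL_append_single (s y src : String) (v : PySem.Set String)
    (l : List ((String × String) × PySem.Set String)) :
    pvProjL (l ++ [((s, y), v)]) src
      = pvProjL l src ++ (if s = src then [(y, v)] else []) := by
  by_cases h : s = src <;> simp [pvProjL, List.filter_append, h]

lemma pv_proj_insert (f : PySem.Dict (String × String) (PySem.Set String)) (s y src : String) (v : PySem.Set String) :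
    pvProj (f.insert (s, y) v) src
      = if s = src then (pvProj f src).insert y v else pvProj f src := by
  by_cases hc : f.contains (s, y) = true
  · have hitems := PySem.Dict.items_insert f (s, y) v
    rw [if_pos hc] at hitems
    by_cases hs : s = src
    · subst hs
      have hc' : (pvProj f s).contains y = true := by rw [pv_contains_proj]; exact hc
      rw [if_pos rfl]
      apply PySem.Dict.ext
      rw [PySem.Dict.items_insert, if_pos hc']
      show pvProjL (f.insert (s, y) v).items s = _
      rw [hitems, pv_projL_replace, if_pos rfl]
      rfl
    · rw [if_neg hs]
      apply PySem.Dict.ext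
      show pvProjL (f.insert (s, y) v).items src = pvProjL f.items src
      rw [hitems, pv_projL_replace, if_neg hs]
  · have hitems := PySem.Dict.items_insert f (s, y) v
    rw [if_neg hc] at hitems
    by_cases hs : s = src
    · subst hs
      have hc' : ¬ (pvProj f s).contains y = true := by rw [pv_contains_proj]; exact hc
      rw [if_pos rfl]
      apply PySem.Dict.ext
      rw [PySem.Dict.items_insert, if_neg hc']
      show pvProjL (f.insert (s, y) v).items s = _
      rw [hitems, pv_projL_append_single, if_pos rfl]
      rfl
    · rw [if_neg hs]
      apply PySem.Dict.ext
      show pvProjL (f.insert (s, y) v).items src = pvProjL f.items src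
      rw [hitems, pv_projL_append_single, if_neg hs, List.append_nil]

lemma pv_proj_modify (f : PySem.Dict (String × String) (PySem.Set String)) (s y src : String)
    (g : PySem.Set String → PySem.Set String) :
    pvProj (f.modify (s, y) PySem.Set.empty g) src
      = if s = src then (pvProj f src).modify y PySem.Set.empty g else pvProj f src := by
  simp only [PySem.Dict.modify, pv_proj_insert]
  by_cases h : s = src
  · subst h; rw [if_pos rfl, if_pos rfl, pv_getD_proj]
  · rw [if_neg h, if_neg h]

lemma pv_proj_inner (s src : String) :
    ∀ (mapping : List (String × List String)) (f : PySem.Dict (String × String) (PySem.Set String)),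
      pvProj (mapping.foldl (fun f2 q => f2.modify (s, q.1) PySem.Set.empty (fun st => PySem.Set.update st q.2)) f) src
        = if s = src then pvInnerApply mapping (pvProj f src) else pvProj f src := by
  intro mapping
  induction mapping with
  | nil => intro f; by_cases h : s = src <;> simp [pvInnerApply, h]
  | cons q mapping ih =>
    intro f
    rw [List.foldl_cons, ih, pv_proj_modify]
    by_cases h : s = src
    · subst h
      rw [if_pos rfl, if_pos rfl, if_pos rfl]
      rfl
    · rw [if_neg h, if_neg h, if_neg h]

lemma pv_proj_fold (src : String) :
    ∀ (L : List (String × List (String × List String))) (f : PySem.Dict (String × String) (PySem.Set String)),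
      pvProj (L.foldl (fun f p =>
          p.2.foldl (fun f2 q => f2.modify (p.1, q.1) PySem.Set.empty (fun s => PySem.Set.update s q.2)) f) f) src
        = (L.filter (fun p => p.1 == src)).foldl (fun m p => pvInnerApply p.2 m) (pvProj f src) := by
  intro L
  induction L with
  | nil => intro f; rfl
  | cons p L ih =>
    intro f
    rw [List.foldl_cons, ih, pv_proj_inner, List.filter_cons]
    by_cases h : p.1 = src
    · rw [if_pos h, if_pos (by simp [h]), List.foldl_cons]
    · rw [if_neg h, if_neg (by simp [h])]

lemma pv_filter_nodup {β : Type} (src : String) :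
    ∀ (l : List (String × β)), (l.map Prod.fst).Nodup →
      l.filter (fun p => p.1 == src)
        = (match l.find? (fun p => p.1 == src) with | some q => [q] | none => []) := by
  intro l
  induction l with
  | nil => intro _; rfl
  | cons q l ih =>
    intro hnd
    simp only [List.map_cons, List.nodup_cons] at hnd
    by_cases h : q.1 = src
    · subst h
      rw [List.filter_cons, List.find?]
      simp only [beq_self_eq_true]
      have : l.filter (fun p => p.1 == q.1) = [] := by
        rw [List.filter_eq_nil_iff]
        intro p hp
        simp only [beq_iff_eq]
        intro hpq
        exact hnd.1 (hpq ▸ List.mem_map_of_mem hp)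
      simp [this]
    · have hne : (q.1 == src) = false := by simp [h]
      rw [List.filter_cons, List.find?]
      simp [hne, ih hnd.2]

-- accumulating a duplicate-free mapping into an empty dict is rebuilding it with fresh sets
lemma pv_innerApply_empty (m : List (String × List String)) (hm : (m.map Prod.fst).Nodup) :
    pvInnerApply m PySem.Dict.empty = pvInner1 m := by
  apply PySem.Dict.ext
  have hk1 : (pvInnerApply m PySem.Dict.empty).keys = m.map Prod.fst := by
    unfold pvInnerApply
    rw [pv_foldl_keys _ (fun d p => pv_keys_insert_add d p.1 _), PySem.Dict.keys_empty,
      PySem.Set.update_nil_left, PySem.Set.ofList_eq_self_of_nodup _ hm]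
  have hk2 : (pvInner1 m).keys = m.map Prod.fst := by
    unfold pvInner1
    rw [pv_foldl_keys _ (fun d p => pv_keys_insert_add d p.1 _), PySem.Dict.keys_empty,
      PySem.Set.update_nil_left, PySem.Set.ofList_eq_self_of_nodup _ hm]
  rw [PySem.Dict.items_eq_map_keys _ (hk1 ▸ hm) PySem.Set.empty,
    PySem.Dict.items_eq_map_keys _ (hk2 ▸ hm) PySem.Set.empty, hk1, hk2]
  apply List.map_congr_left
  intro sym _
  have hg1 := pv_foldl_getD
      (F := fun d q => d.insert q.1 (PySem.Set.update (d.getD q.1 PySem.Set.empty) q.2))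
      (G := fun v q => PySem.Set.update v q.2) (dflt := PySem.Set.empty)
      (fun d p k hk => PySem.Dict.getD_insert_of_ne d _ _ hk)
      (fun d p => PySem.Dict.getD_insert_self d p.1 _ _) m hm PySem.Dict.empty sym
  have hg2 := pv_foldl_getD
      (F := fun d q => d.insert q.1 (PySem.Set.ofList q.2))
      (G := fun (v : PySem.Set String) (q : String × List String) => PySem.Set.ofList q.2)
      (dflt := PySem.Set.empty)
      (fun d p k hk => PySem.Dict.getD_insert_of_ne d _ _ hk)
      (fun d p => PySem.Dict.getD_insert_self d p.1 _ _) m hm PySem.Dict.empty sym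
  unfold pvInnerApply pvInner1
  rw [hg1, hg2]
  cases m.find? (fun q => q.1 == sym) <;>
    simp [PySem.Dict.getD_empty, PySem.Set.update_nil_left]

-- Set.update with elements already present changes nothing
lemma pv_update_of_subset (K L : List String) (h : ∀ x ∈ L, x ∈ K) : PySem.Set.update K L = K := by
  induction L generalizing K with
  | nil => exact PySem.Set.update_nil K
  | cons x L ih =>
    rw [PySem.Set.update_cons, PySem.Set.add_of_mem (h x (List.mem_cons_self ..))]
    exact ih K (fun y hy => h y (List.mem_cons_of_mem _ hy))

-- B's regroup loop, looked up at one source, builds exactly the projected entries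
lemma pv_group_getD (src : String) :
    ∀ (l : List ((String × String) × PySem.Set String)) (n : PySem.Dict String (PySem.Dict String (PySem.Set String))),
      (l.foldl (fun n kv => n.modify kv.1.1 PySem.Dict.empty (fun m => m.insert kv.1.2 kv.2)) n).getD src PySem.Dict.empty
        = (pvProjL l src).foldl (fun m q => m.insert q.1 q.2) (n.getD src PySem.Dict.empty) := by
  intro l
  induction l with
  | nil => intro n; rfl
  | cons kv l ih =>
    intro n
    obtain ⟨⟨a, b⟩, v⟩ := kv
    rw [List.foldl_cons, ih, pvProjL_cons]
    by_cases h : a = src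
    · subst h
      rw [if_pos rfl, List.singleton_append, List.foldl_cons, PySem.Dict.getD_modify_self]
    · rw [if_neg h, List.nil_append, PySem.Dict.getD_modify_of_ne _ _ _ (fun hh => h hh.symm)]

-- seeding with empty inner dicts never yields a non-empty lookup
lemma pv_seed_getD (src : String) :
    ∀ (L : List (String × List (String × List String))) (n : PySem.Dict String (PySem.Dict String (PySem.Set String))),
      n.getD src PySem.Dict.empty = PySem.Dict.empty →
      (L.foldl (fun d p => d.insert p.1 PySem.Dict.empty) n).getD src PySem.Dict.empty = PySem.Dict.empty := by
  intro L
  induction L with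
  | nil => intro n h; exact h
  | cons p L ih =>
    intro n h
    rw [List.foldl_cons]
    apply ih
    by_cases hp : src = p.1
    · rw [hp, PySem.Dict.getD_insert_self]
    · rw [PySem.Dict.getD_insert_of_ne _ _ _ hp, h]

-- inserting a duplicate-free association list into an empty dict reproduces it
lemma pv_mk_foldl_insert (l : List (String × PySem.Set String)) (h : (l.map Prod.fst).Nodup) :
    l.foldl (fun m q => m.insert q.1 q.2) (PySem.Dict.empty : PySem.Dict String (PySem.Set String)) = PySem.Dict.mk l := by
  apply PySem.Dict.ext
  have hfresh : ∀ a ∈ l, (PySem.Dict.empty : PySem.Dict String (PySem.Set String)).contains a.1 = false := by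
    intro a _
    simp
  rw [PySem.Dict.items_foldl_insert_fresh l Prod.fst Prod.snd PySem.Dict.empty hfresh h]
  have hemp : (PySem.Dict.empty : PySem.Dict String (PySem.Set String)).items = [] := rfl
  rw [hemp]
  simp

-- every key of the flat dict has its first component among the source keys
lemma pv_flat_keys_fst :
    ∀ (L : List (String × List (String × List String))) (f : PySem.Dict (String × String) (PySem.Set String)),
      ∀ kv ∈ (L.foldl (fun f p =>
          p.2.foldl (fun f2 q => f2.modify (p.1, q.1) PySem.Set.empty (fun s => PySem.Set.update s q.2)) f) f).keys,
        kv ∈ f.keys ∨ kv.1 ∈ L.map Prod.fst := by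
  intro L
  induction L with
  | nil => intro f kv h; exact Or.inl h
  | cons p L ih =>
    intro f kv h
    rw [List.foldl_cons] at h
    rcases ih _ kv h with h' | h'
    · rw [PySem.Dict.keys_foldl_modify_key p.2 (fun q => (p.1, q.1)) PySem.Set.empty
        (fun _ q => fun s => PySem.Set.update s q.2) f] at h'
      rcases (PySem.Set.mem_update _ _ _).1 h' with h2 | h2
      · exact Or.inl h2
      · obtain ⟨q, hq, rfl⟩ := List.mem_map.1 h2
        right; simp
    · right
      rw [List.map_cons]
      exact List.mem_cons_of_mem _ h'

-- the flat dict's keys stay duplicate-free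
lemma pv_flat_keys_nodup :
    ∀ (L : List (String × List (String × List String))) (f : PySem.Dict (String × String) (PySem.Set String)),
      f.keys.Nodup →
      (L.foldl (fun f p =>
          p.2.foldl (fun f2 q => f2.modify (p.1, q.1) PySem.Set.empty (fun s => PySem.Set.update s q.2)) f) f).keys.Nodup := by
  intro L
  induction L with
  | nil => intro f h; exact h
  | cons p L ih =>
    intro f h
    rw [List.foldl_cons]
    exact ih _ (PySem.Dict.nodup_keys_foldl_modify_key p.2 (fun q => (p.1, q.1)) PySem.Set.empty
      (fun _ q => fun s => PySem.Set.update s q.2) f h)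

-- the projection of a duplicate-free flat item list has duplicate-free keys
lemma pv_projL_nodup (src : String) (l : List ((String × String) × PySem.Set String))
    (h : (l.map Prod.fst).Nodup) : ((pvProjL l src).map Prod.fst).Nodup := by
  unfold pvProjL
  rw [List.map_map]
  have hfil : ((l.filter (fun kv => kv.1.1 == src)).map Prod.fst).Nodup :=
    h.sublist ((l.filter_sublist).map Prod.fst)
  have hcomp : ((l.filter (fun kv => kv.1.1 == src)).map (Prod.fst ∘ (fun kv => (kv.1.2, kv.2))))
      = ((l.filter (fun kv => kv.1.1 == src)).map Prod.fst).map Prod.snd := by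
    rw [List.map_map]
    rfl
  rw [hcomp]
  apply hfil.map_on
  intro x hx y hy hxy
  obtain ⟨kx, hkx, rfl⟩ := List.mem_map.1 hx
  obtain ⟨ky, hky, rfl⟩ := List.mem_map.1 hy
  have hx1 : kx.1.1 = src := by simpa using (List.mem_filter.1 hkx).2
  have hy1 : ky.1.1 = src := by simpa using (List.mem_filter.1 hky).2
  exact Prod.ext (hx1.trans hy1.symm) hxy

-- main equivalence
lemma pv_main (t1 t2 : List (String × List (String × List String)))
    (h1 : (t1.map Prod.fst).Nodup) (h2 : (t2.map Prod.fst).Nodup)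
    (h3 : ∀ p ∈ t1, (p.2.map Prod.fst).Nodup) :
    merge_transitions t1 t2 = merge_transitions_alt t1 t2 := by
  simp only [merge_transitions, merge_transitions_alt]
  -- A side: keys and per-source lookup of the final dict-of-dicts
  have hstep_ne : ∀ (d : PySem.Dict String (PySem.Dict String (PySem.Set String)))
      (p : String × List (String × List String)) (k : String), k ≠ p.1 →
      ((p.2.foldl (fun d2 q => d2.modify p.1 PySem.Dict.empty
          (fun m => m.insert q.1 (PySem.Set.update (m.getD q.1 PySem.Set.empty) q.2)))
        (if d.contains p.1 then d else d.insert p.1 PySem.Dict.empty)).getD k PySem.Dict.empty)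
        = d.getD k PySem.Dict.empty := by
    intro d p k hk
    rw [pv_modfold_getD_ne p.1 k hk]
    by_cases h : d.contains p.1 = true
    · rw [if_pos h]
    · rw [if_neg h, PySem.Dict.getD_insert_of_ne _ _ _ hk]
  have hstep_self : ∀ (d : PySem.Dict String (PySem.Dict String (PySem.Set String)))
      (p : String × List (String × List String)),
      ((p.2.foldl (fun d2 q => d2.modify p.1 PySem.Dict.empty
          (fun m => m.insert q.1 (PySem.Set.update (m.getD q.1 PySem.Set.empty) q.2)))
        (if d.contains p.1 then d else d.insert p.1 PySem.Dict.empty)).getD p.1 PySem.Dict.empty)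
        = pvInnerApply p.2 (d.getD p.1 PySem.Dict.empty) := by
    intro d p
    rw [pv_modfold_getD_self]
    congr 1
    by_cases h : d.contains p.1 = true
    · rw [if_pos h]
    · rw [if_neg h, PySem.Dict.getD_insert_self, PySem.Dict.getD_of_not_contains d _ (by simpa using h)]
  have hstep_keys : ∀ (d : PySem.Dict String (PySem.Dict String (PySem.Set String)))
      (p : String × List (String × List String)),
      ((p.2.foldl (fun d2 q => d2.modify p.1 PySem.Dict.empty
          (fun m => m.insert q.1 (PySem.Set.update (m.getD q.1 PySem.Set.empty) q.2)))
        (if d.contains p.1 then d else d.insert p.1 PySem.Dict.empty)).keys)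
        = PySem.Set.add d.keys p.1 := by
    intro d p
    by_cases h : d.contains p.1 = true
    · rw [if_pos h, pv_modfold_keys p.1 p.2 d ((PySem.Dict.contains_iff_mem_keys d p.1).1 h),
        PySem.Set.add_of_mem ((PySem.Dict.contains_iff_mem_keys d p.1).1 h)]
    · rw [if_neg h,
        pv_modfold_keys p.1 p.2 _ (by
          rw [pv_keys_insert_add]
          exact (PySem.Set.mem_add _ _ _).2 (Or.inr rfl)),
        pv_keys_insert_add]
  have hkeys0 : (t1.foldl (fun d p => d.insert p.1
      (p.2.foldl (fun m q => m.insert q.1 (PySem.Set.ofList q.2)) PySem.Dict.empty)) PySem.Dict.empty).keys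
      = t1.map Prod.fst := by
    rw [pv_foldl_keys _ (fun d p => pv_keys_insert_add d p.1 _), PySem.Dict.keys_empty,
      PySem.Set.update_nil_left, PySem.Set.ofList_eq_self_of_nodup _ h1]
  have hkeysf : (t2.foldl (fun d p =>
      p.2.foldl (fun d2 q => d2.modify p.1 PySem.Dict.empty
          (fun m => m.insert q.1 (PySem.Set.update (m.getD q.1 PySem.Set.empty) q.2)))
        (if d.contains p.1 then d else d.insert p.1 PySem.Dict.empty))
      (t1.foldl (fun d p => d.insert p.1
        (p.2.foldl (fun m q => m.insert q.1 (PySem.Set.ofList q.2)) PySem.Dict.empty)) PySem.Dict.empty)).keys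
      = PySem.Set.update (t1.map Prod.fst) (t2.map Prod.fst) := by
    rw [pv_foldl_keys _ hstep_keys, hkeys0]
  have hnodupf := hkeysf ▸ PySem.Set.nodup_update (t1.map Prod.fst) (t2.map Prod.fst) h1
  -- B side: keys of the seeded nested dict and of the regrouped result
  have hkeysB0 : ((t1 ++ t2).foldl (fun n p => n.insert p.1 (PySem.Dict.empty : PySem.Dict String (PySem.Set String))) PySem.Dict.empty).keys
      = PySem.Set.update (t1.map Prod.fst) (t2.map Prod.fst) := by
    rw [PySem.Dict.keys_foldl_insert_key (t1 ++ t2) Prod.fst (fun _ _ => PySem.Dict.empty) PySem.Dict.empty,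
      PySem.Dict.keys_empty, PySem.Set.update_nil_left, List.map_append, PySem.Set.ofList_append,
      PySem.Set.ofList_eq_self_of_nodup _ h1]
  have hflatnodup : ((t1 ++ t2).foldl (fun f p =>
        p.2.foldl (fun f2 q => f2.modify (p.1, q.1) PySem.Set.empty (fun s => PySem.Set.update s q.2)) f)
        PySem.Dict.empty).keys.Nodup :=
    pv_flat_keys_nodup (t1 ++ t2) PySem.Dict.empty PySem.Dict.nodup_keys_empty
  have hkeysN : ((((t1 ++ t2).foldl (fun f p =>
        p.2.foldl (fun f2 q => f2.modify (p.1, q.1) PySem.Set.empty (fun s => PySem.Set.update s q.2)) f)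
        PySem.Dict.empty).items.foldl (fun n kv => n.modify kv.1.1 PySem.Dict.empty (fun m => m.insert kv.1.2 kv.2))
        ((t1 ++ t2).foldl (fun n p => n.insert p.1 PySem.Dict.empty) PySem.Dict.empty)).keys)
      = PySem.Set.update (t1.map Prod.fst) (t2.map Prod.fst) := by
    have hkn : ((((t1 ++ t2).foldl (fun f p =>
          p.2.foldl (fun f2 q => f2.modify (p.1, q.1) PySem.Set.empty (fun s => PySem.Set.update s q.2)) f)
          PySem.Dict.empty).items.foldl (fun n kv => n.modify kv.1.1 PySem.Dict.empty (fun m => m.insert kv.1.2 kv.2))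
          ((t1 ++ t2).foldl (fun n p => n.insert p.1 PySem.Dict.empty) PySem.Dict.empty)).keys)
        = PySem.Set.update ((t1 ++ t2).foldl (fun n p => n.insert p.1 (PySem.Dict.empty : PySem.Dict String (PySem.Set String))) PySem.Dict.empty).keys
            (((t1 ++ t2).foldl (fun f p =>
              p.2.foldl (fun f2 q => f2.modify (p.1, q.1) PySem.Set.empty (fun s => PySem.Set.update s q.2)) f)
              PySem.Dict.empty).items.map (fun kv => kv.1.1)) :=
      PySem.Dict.keys_foldl_modify_key
        (((t1 ++ t2).foldl (fun f p =>
          p.2.foldl (fun f2 q => f2.modify (p.1, q.1) PySem.Set.empty (fun s => PySem.Set.update s q.2)) f)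
          PySem.Dict.empty).items)
        (fun kv => kv.1.1) PySem.Dict.empty
        (fun _ kv => fun m => m.insert kv.1.2 kv.2)
        ((t1 ++ t2).foldl (fun n p => n.insert p.1 PySem.Dict.empty) PySem.Dict.empty)
    rw [hkn, hkeysB0]
    apply pv_update_of_subset
    intro x hx
    obtain ⟨kv, hkv, rfl⟩ := List.mem_map.1 hx
    have hmem : kv.1 ∈ ((t1 ++ t2).foldl (fun f p =>
        p.2.foldl (fun f2 q => f2.modify (p.1, q.1) PySem.Set.empty (fun s => PySem.Set.update s q.2)) f)
        PySem.Dict.empty).keys := by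
      exact List.mem_map_of_mem hkv
    rcases pv_flat_keys_fst (t1 ++ t2) PySem.Dict.empty kv.1 hmem with h' | h'
    · simp [PySem.Dict.keys_empty] at h'
    · rw [List.map_append] at h'
      exact (PySem.Set.mem_update _ _ _).2 ((List.mem_append.1 h').elim
        (fun h'' => Or.inl h'') (fun h'' => Or.inr h''))
  have hnodupN := hkeysN ▸ PySem.Set.nodup_update (t1.map Prod.fst) (t2.map Prod.fst) h1
  rw [PySem.Dict.items_eq_map_keys _ hnodupf PySem.Dict.empty,
    PySem.Dict.items_eq_map_keys _ hnodupN PySem.Dict.empty, hkeysf, hkeysN, List.map_map, List.map_map]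
  apply List.map_congr_left
  intro src _
  simp only [Function.comp]
  -- per source: A's looked-up inner dict equals B's regrouped inner dict
  have hv := pv_foldl_getD
    (F := fun d p => p.2.foldl (fun d2 q => d2.modify p.1 PySem.Dict.empty
          (fun m => m.insert q.1 (PySem.Set.update (m.getD q.1 PySem.Set.empty) q.2)))
        (if d.contains p.1 then d else d.insert p.1 PySem.Dict.empty))
    (G := fun m p => pvInnerApply p.2 m) (dflt := PySem.Dict.empty)
    hstep_ne hstep_self t2 h2
    (t1.foldl (fun d p => d.insert p.1
      (p.2.foldl (fun m q => m.insert q.1 (PySem.Set.ofList q.2)) PySem.Dict.empty)) PySem.Dict.empty) src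
  have hv1 := pv_foldl_getD
    (F := fun d p => d.insert p.1
      (p.2.foldl (fun m q => m.insert q.1 (PySem.Set.ofList q.2)) PySem.Dict.empty))
    (G := fun (m : PySem.Dict String (PySem.Set String)) p => pvInner1 p.2) (dflt := PySem.Dict.empty)
    (fun d p k hk => PySem.Dict.getD_insert_of_ne d _ _ hk)
    (fun d p => PySem.Dict.getD_insert_self d p.1 (pvInner1 p.2) _) t1 h1 PySem.Dict.empty src
  have hproj : pvProj ((t1 ++ t2).foldl (fun f p =>
        p.2.foldl (fun f2 q => f2.modify (p.1, q.1) PySem.Set.empty (fun s => PySem.Set.update s q.2)) f)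
        PySem.Dict.empty) src
      = ((t2.foldl (fun d p =>
          p.2.foldl (fun d2 q => d2.modify p.1 PySem.Dict.empty
              (fun m => m.insert q.1 (PySem.Set.update (m.getD q.1 PySem.Set.empty) q.2)))
            (if d.contains p.1 then d else d.insert p.1 PySem.Dict.empty))
          (t1.foldl (fun d p => d.insert p.1
            (p.2.foldl (fun m q => m.insert q.1 (PySem.Set.ofList q.2)) PySem.Dict.empty)) PySem.Dict.empty)).getD
          src PySem.Dict.empty) := by
    have hPE : pvProj (PySem.Dict.empty : PySem.Dict (String × String) (PySem.Set String)) src = PySem.Dict.empty := rfl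
    rw [pv_proj_fold, hPE, List.filter_append, hv, hv1, pv_filter_nodup src t1 h1, pv_filter_nodup src t2 h2]
    cases hf1 : t1.find? (fun p => p.1 == src) with
    | none =>
      cases hf2 : t2.find? (fun p => p.1 == src) with
      | none => rfl
      | some q2 => rfl
    | some q1 =>
      have hq1 := pv_innerApply_empty q1.2 (h3 q1 (List.mem_of_find?_eq_some hf1))
      cases hf2 : t2.find? (fun p => p.1 == src) with
      | none =>
        simp only [List.append_nil, List.foldl_cons, List.foldl_nil]
        exact hq1
      | some q2 =>
        simp only [List.singleton_append, List.foldl_cons, List.foldl_nil]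
        rw [hq1]
  have hBsrc : (((((t1 ++ t2).foldl (fun f p =>
        p.2.foldl (fun f2 q => f2.modify (p.1, q.1) PySem.Set.empty (fun s => PySem.Set.update s q.2)) f)
        PySem.Dict.empty).items.foldl (fun n kv => n.modify kv.1.1 PySem.Dict.empty (fun m => m.insert kv.1.2 kv.2))
        ((t1 ++ t2).foldl (fun n p => n.insert p.1 PySem.Dict.empty) PySem.Dict.empty)).getD src PySem.Dict.empty))
      = pvProj ((t1 ++ t2).foldl (fun f p =>
        p.2.foldl (fun f2 q => f2.modify (p.1, q.1) PySem.Set.empty (fun s => PySem.Set.update s q.2)) f)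
        PySem.Dict.empty) src := by
    rw [pv_group_getD, pv_seed_getD src (t1 ++ t2) PySem.Dict.empty rfl,
      pv_mk_foldl_insert _ (pv_projL_nodup src _ hflatnodup)]
    rfl
  rw [hBsrc, hproj]
-- ===== VERDICT (by name: the statement is the Claim_ definition above) =====
theorem merge_transitions_spec : Claim_equal_merge_transitions := by
  intro t1 t2 _ hpre
  obtain ⟨h1, h2, h3⟩ := hpre
  unfold Spec_merge_transitions
  exact pv_main t1 t2 h1 h2 h3
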